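-- pv_equiv track=rewrite | github.com/DirkR/capturadio | capturadio/recorder_cli.py | find_command
-- ===== SOURCE A (Python) =====
-- def find_command(args):
--     if not args['help']:
--         for command in ['feed', 'config', 'show']:
--             if args[command]:
--                 for action in ['list', 'update', 'capture', 'show',
--                                'setup', 'cleanup']:
--                     if args[action]:
--                         return r'%s_%s' % (command, action)
--     return 'help'
-- ===== SOURCE B (Python) =====
-- COMMANDS = ['feed', 'config', 'show']
-- ACTIONS = ['list', 'update', 'capture', 'show', 'setup', 'cleanup']
-- CMD_RANK = {c: i for i, c in enumerate(COMMANDS)}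
-- ACT_RANK = {a: i for i, a in enumerate(ACTIONS)}
--
--
-- def find_command(args):
--     if args['help']:
--         return 'help'
--     best_c, best_a = 3, 6
--     for key in args:
--         if args[key]:
--             best_c = min(best_c, CMD_RANK.get(key, 3))
--             best_a = min(best_a, ACT_RANK.get(key, 6))
--     if best_c < 3 and best_a < 6:
--         return '%s_%s' % (COMMANDS[best_c], ACTIONS[best_a])
--     return 'help'
-- ===== Notes on version B (the rewrite author's own statement) =====
-- stated objective: alternative
-- what changed: A's nested first-match scans over constant command/action lists are replaced by a single pass over the dict's keys that keeps the minimal command rank and minimal action rank via precomputed rank tables, then indexes the name lists with the two minima.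
import Mathlib
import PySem

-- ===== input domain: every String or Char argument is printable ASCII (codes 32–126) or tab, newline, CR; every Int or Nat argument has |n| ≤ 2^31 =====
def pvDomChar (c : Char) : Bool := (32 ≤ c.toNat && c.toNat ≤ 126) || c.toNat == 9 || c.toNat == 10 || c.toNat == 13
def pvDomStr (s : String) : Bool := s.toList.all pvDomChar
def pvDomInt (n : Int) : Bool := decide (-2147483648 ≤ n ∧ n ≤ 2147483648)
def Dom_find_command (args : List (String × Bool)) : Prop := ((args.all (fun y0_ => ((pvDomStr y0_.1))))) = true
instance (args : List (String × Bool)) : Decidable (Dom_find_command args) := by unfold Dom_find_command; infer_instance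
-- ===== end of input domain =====

-- B replaces A's nested first-match scans over constant lists by ONE pass over the dict's
-- keys that keeps the minimal command rank and minimal action rank seen so far (rank
-- tables), then indexes the name lists with the two minima; return values agree on Pre_.

-- ===== PORT A =====
-- the docopt dict, as a PySem.Dict over the given association list
def pvDict (args : List (String × Bool)) : PySem.Dict String Bool := PySem.Dict.mk args

-- inner 'for action in [...]: if args[action]: return …' — first truthy action, if any
def pvInnerA (args : List (String × Bool)) : List String → Option String
  | [] => none
  | a :: rest => if PySem.Dict.getD (pvDict args) a false then some a else pvInnerA args rest

-- outer 'for command in [...]' loop of A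
def pvOuterA (args : List (String × Bool)) : List String → String
  | [] => "help"
  | c :: rest =>
    if PySem.Dict.getD (pvDict args) c false then
      match pvInnerA args ["list", "update", "capture", "show", "setup", "cleanup"] with
      | some a => c ++ "_" ++ a
      | none => pvOuterA args rest
    else pvOuterA args rest

def find_command (args : List (String × Bool)) : String :=
  if !(PySem.Dict.getD (pvDict args) "help" false) then
    pvOuterA args ["feed", "config", "show"]
  else "help"

-- ===== PORT B =====
def pvCommands : List String := ["feed", "config", "show"]
def pvActions : List String := ["list", "update", "capture", "show", "setup", "cleanup"]
def pvCmdRank : PySem.Dict String Int := PySem.Dict.mk [("feed", 0), ("config", 1), ("show", 2)]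
def pvActRank : PySem.Dict String Int := PySem.Dict.mk [("list", 0), ("update", 1), ("capture", 2), ("show", 3), ("setup", 4), ("cleanup", 5)]

-- loop body: 'if args[key]: best_c = min(best_c, CMD_RANK.get(key, 3)); best_a = min(best_a, ACT_RANK.get(key, 6))'
def pvStepB (args : List (String × Bool)) (st : Int × Int) (key : String) : Int × Int :=
  if PySem.Dict.getD (pvDict args) key false then
    (min st.1 (PySem.Dict.getD pvCmdRank key 3), min st.2 (PySem.Dict.getD pvActRank key 6))
  else st

-- 'for key in args' iterates the dict's distinct keys in first-occurrence order = PySem.List.dedup of the key list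
def find_command_alt (args : List (String × Bool)) : String :=
  if PySem.Dict.getD (pvDict args) "help" false then "help"
  else
    let st := (PySem.List.dedup (args.map Prod.fst)).foldl (pvStepB args) (3, 6)
    if st.1 < 3 ∧ st.2 < 6 then
      -- COMMANDS[best_c] / ACTIONS[best_a]: under the guard both indices are in range, so the default is never read
      PySem.List.pyGetD pvCommands st.1 "" ++ "_" ++ PySem.List.pyGetD pvActions st.2 ""
    else "help"

-- ===== PRECONDITION & SPEC =====
-- Pre_ = exactly the inputs on which Python A returns (no KeyError): 'help' present, and
-- if falsy, every key the command/action scans actually read is present.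
def pvHas (args : List (String × Bool)) (k : String) : Bool :=
  (PySem.Dict.get? (pvDict args) k).isSome
def pvVal (args : List (String × Bool)) (k : String) : Bool :=
  PySem.Dict.getD (pvDict args) k false

-- no raise during the action scan: each key read before (and including) the first truthy one is present
def pvActOK (args : List (String × Bool)) : Bool :=
  pvHas args "list" && (pvVal args "list" || (pvHas args "update" && (pvVal args "update" ||
    (pvHas args "capture" && (pvVal args "capture" || (pvHas args "show" && (pvVal args "show" ||
    (pvHas args "setup" && (pvVal args "setup" || pvHas args "cleanup")))))))))

-- the action scan finds a truthy action
def pvActHit (args : List (String × Bool)) : Bool :=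
  pvVal args "list" || pvVal args "update" || pvVal args "capture" ||
  pvVal args "show" || pvVal args "setup" || pvVal args "cleanup"

-- no raise in A's command loop starting at "show" / "config" / "feed"
def pvC1 (args : List (String × Bool)) : Bool :=
  pvHas args "show" && (!pvVal args "show" || pvActOK args)

def pvC2 (args : List (String × Bool)) : Bool :=
  pvHas args "config" && (!pvVal args "config" || (pvActOK args && (pvActHit args || pvHas args "show"))) &&
    (pvVal args "config" || pvC1 args)

def pvC3 (args : List (String × Bool)) : Bool :=
  pvHas args "feed" && (!pvVal args "feed" || (pvActOK args && (pvActHit args || (pvHas args "config" && pvHas args "show")))) &&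
    (pvVal args "feed" || pvC2 args)

def Pre_find_command (args : List (String × Bool)) : Prop :=
  (pvHas args "help" && (pvVal args "help" || pvC3 args)) = true
instance (args : List (String × Bool)) : Decidable (Pre_find_command args) := by
  unfold Pre_find_command; infer_instance

def pvWitness_find_command : (List (String × Bool)) :=
  [("help", false), ("feed", true), ("config", false), ("show", false),
   ("list", false), ("update", true), ("capture", false), ("setup", false), ("cleanup", false)]

def Spec_find_command (args : List (String × Bool)) (out : String) : Prop := out = find_command_alt args
instance (args : List (String × Bool)) (out : String) : Decidable (Spec_find_command args out) := by unfold Spec_find_command; infer_instance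

-- ===== CLAIM (what is proved, stated in full; the proofs are below) =====
def Claim_equal_find_command : Prop := ∀ (args : List (String × Bool)), Dom_find_command args → Pre_find_command args → Spec_find_command args (find_command args)

-- ===== LEMMAS AND PROOFS =====

-- truthiness of args[k] (with a missing key read as falsy), shorthand for the proofs
def pvT (args : List (String × Bool)) (k : String) : Bool :=
  PySem.Dict.getD (pvDict args) k false

-- the generic accumulator loop of B, one component at a time
def pvFoldR (args : List (String × Bool)) (rank : String → Int) (L : List String) (m : Int) : Int :=
  L.foldl (fun m k => if pvT args k then min m (rank k) else m) m

def pvRc (k : String) : Int := PySem.Dict.getD pvCmdRank k 3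
def pvRa (k : String) : Int := PySem.Dict.getD pvActRank k 6

theorem pvRc_spec (k : String) :
    pvRc k = if k = "feed" then 0 else if k = "config" then 1 else if k = "show" then 2 else 3 := by
  unfold pvRc pvCmdRank
  simp only [PySem.Dict.getD, PySem.Dict.get?, List.find?]
  by_cases h1 : k = "feed"
  · subst h1; decide
  by_cases h2 : k = "config"
  · subst h2; decide
  by_cases h3 : k = "show"
  · subst h3; decide
  have b1 : ("feed" == k) = false := beq_eq_false_iff_ne.mpr (fun e => h1 e.symm)
  have b2 : ("config" == k) = false := beq_eq_false_iff_ne.mpr (fun e => h2 e.symm)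
  have b3 : ("show" == k) = false := beq_eq_false_iff_ne.mpr (fun e => h3 e.symm)
  simp [h1, h2, h3, b1, b2, b3]

theorem pvRa_spec (k : String) :
    pvRa k = if k = "list" then 0 else if k = "update" then 1 else if k = "capture" then 2
      else if k = "show" then 3 else if k = "setup" then 4 else if k = "cleanup" then 5 else 6 := by
  unfold pvRa pvActRank
  simp only [PySem.Dict.getD, PySem.Dict.get?, List.find?]
  by_cases h1 : k = "list"
  · subst h1; decide
  by_cases h2 : k = "update"
  · subst h2; decide
  by_cases h3 : k = "capture"
  · subst h3; decide
  by_cases h4 : k = "show"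
  · subst h4; decide
  by_cases h5 : k = "setup"
  · subst h5; decide
  by_cases h6 : k = "cleanup"
  · subst h6; decide
  have b1 : ("list" == k) = false := beq_eq_false_iff_ne.mpr (fun e => h1 e.symm)
  have b2 : ("update" == k) = false := beq_eq_false_iff_ne.mpr (fun e => h2 e.symm)
  have b3 : ("capture" == k) = false := beq_eq_false_iff_ne.mpr (fun e => h3 e.symm)
  have b4 : ("show" == k) = false := beq_eq_false_iff_ne.mpr (fun e => h4 e.symm)
  have b5 : ("setup" == k) = false := beq_eq_false_iff_ne.mpr (fun e => h5 e.symm)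
  have b6 : ("cleanup" == k) = false := beq_eq_false_iff_ne.mpr (fun e => h6 e.symm)
  simp [h1, h2, h3, h4, h5, h6, b1, b2, b3, b4, b5, b6]

-- B's fold splits into two independent rank-minimum folds
theorem pvFoldB_split (args : List (String × Bool)) :
    ∀ (L : List String) (m1 m2 : Int),
      L.foldl (pvStepB args) (m1, m2) = (pvFoldR args pvRc L m1, pvFoldR args pvRa L m2) := by
  intro L
  induction L with
  | nil => intro m1 m2; rfl
  | cons k rest ih =>
    intro m1 m2
    show rest.foldl (pvStepB args) (pvStepB args (m1, m2) k) = _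
    have hr : pvStepB args (m1, m2) k =
        (if pvT args k then min m1 (pvRc k) else m1,
         if pvT args k then min m2 (pvRa k) else m2) := by
      unfold pvStepB pvT pvRc pvRa
      by_cases h : PySem.Dict.getD (pvDict args) k false = true <;> simp [h]
    rw [hr, ih]
    rfl

theorem pvFoldR_le_init (args : List (String × Bool)) (rank : String → Int) :
    ∀ (L : List String) (m : Int), pvFoldR args rank L m ≤ m := by
  intro L
  induction L with
  | nil => intro m; exact le_refl m
  | cons k rest ih =>
    intro m
    show pvFoldR args rank rest (if pvT args k then min m (rank k) else m) ≤ m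
    refine le_trans (ih _) ?_
    by_cases h : pvT args k = true <;> simp [h]

theorem pvFoldR_le_of_mem (args : List (String × Bool)) (rank : String → Int) (x : String) :
    ∀ (L : List String) (m : Int), x ∈ L → pvT args x = true → pvFoldR args rank L m ≤ rank x := by
  intro L
  induction L with
  | nil => intro m hx; simp at hx
  | cons k rest ih =>
    intro m hx ht
    rcases List.mem_cons.mp hx with h | h
    · subst h
      show pvFoldR args rank rest (if pvT args x then min m (rank x) else m) ≤ rank x
      rw [if_pos ht]
      exact le_trans (pvFoldR_le_init args rank rest _) (min_le_right _ _)
    · exact ih _ h ht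

theorem pvFoldR_lb (args : List (String × Bool)) (rank : String → Int) (c : Int) :
    ∀ (L : List String) (m : Int), c ≤ m → (∀ k ∈ L, pvT args k = true → c ≤ rank k) →
      c ≤ pvFoldR args rank L m := by
  intro L
  induction L with
  | nil => intro m hm _; exact hm
  | cons k rest ih =>
    intro m hm hall
    show c ≤ pvFoldR args rank rest (if pvT args k then min m (rank k) else m)
    refine ih _ ?_ (fun j hj => hall j (List.mem_cons_of_mem _ hj))
    by_cases h : pvT args k = true
    · rw [if_pos h]; exact le_min hm (hall k List.mem_cons_self h)
    · rw [if_neg h]; exact hm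

-- a truthy key is present in the dict's key list
theorem pvMem_of_T (args : List (String × Bool)) (k : String) (h : pvT args k = true) :
    k ∈ PySem.List.dedup (args.map Prod.fst) := by
  rw [PySem.List.mem_dedup]
  unfold pvT PySem.Dict.getD at h
  rcases hf : PySem.Dict.get? (pvDict args) k with _ | v
  · rw [hf] at h; simp at h
  · unfold PySem.Dict.get? at hf
    rcases hl : List.find? (fun p => p.1 == k) (pvDict args).items with _ | p
    · rw [hl] at hf; simp at hf
    · have hp : p ∈ (pvDict args).items := List.mem_of_find?_eq_some hl
      have hk : p.1 = k := by
        have := List.find?_some hl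
        simpa using this
      have : p.1 ∈ (args.map Prod.fst) := List.mem_map_of_mem hp
      rwa [hk] at this

-- closed form of B's command minimum
theorem pvBestC_closed (args : List (String × Bool)) (L : List String)
    (hmem : ∀ k, pvT args k = true → k ∈ L) :
    pvFoldR args pvRc L 3 =
      (if pvT args "feed" then (0:Int) else if pvT args "config" then 1
        else if pvT args "show" then 2 else 3) := by
  split_ifs with h1 h2 h3
  · have hu := pvFoldR_le_of_mem args pvRc "feed" L 3 (hmem _ h1) h1
    rw [pvRc_spec] at hu; simp at hu
    have hl := pvFoldR_lb args pvRc 0 L 3 (by norm_num)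
      (fun k _ _ => by rw [pvRc_spec]; split_ifs <;> omega)
    omega
  · have hu := pvFoldR_le_of_mem args pvRc "config" L 3 (hmem _ h2) h2
    rw [pvRc_spec] at hu; simp at hu
    have hl := pvFoldR_lb args pvRc 1 L 3 (by norm_num)
      (fun k _ ht => by
        rw [pvRc_spec]; split_ifs with e1 e2 e3 <;> try omega
        exact absurd (e1 ▸ ht) (by simpa using h1))
    omega
  · have hu := pvFoldR_le_of_mem args pvRc "show" L 3 (hmem _ h3) h3
    rw [pvRc_spec] at hu; simp at hu
    have hl := pvFoldR_lb args pvRc 2 L 3 (by norm_num)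
      (fun k _ ht => by
        rw [pvRc_spec]; split_ifs with e1 e2 e3 <;> try omega
        · exact absurd (e1 ▸ ht) (by simpa using h1)
        · exact absurd (e2 ▸ ht) (by simpa using h2))
    omega
  · have hu := pvFoldR_le_init args pvRc L 3
    have hl := pvFoldR_lb args pvRc 3 L 3 (by norm_num)
      (fun k _ ht => by
        rw [pvRc_spec]; split_ifs with e1 e2 e3 <;> try omega
        · exact absurd (e1 ▸ ht) (by simpa using h1)
        · exact absurd (e2 ▸ ht) (by simpa using h2)
        · exact absurd (e3 ▸ ht) (by simpa using h3))
    omega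

-- closed form of B's action minimum
theorem pvBestA_closed (args : List (String × Bool)) (L : List String)
    (hmem : ∀ k, pvT args k = true → k ∈ L) :
    pvFoldR args pvRa L 6 =
      (if pvT args "list" then (0:Int) else if pvT args "update" then 1
        else if pvT args "capture" then 2 else if pvT args "show" then 3
        else if pvT args "setup" then 4 else if pvT args "cleanup" then 5 else 6) := by
  have lb : ∀ (c : Int), c ≤ 6 →
      (∀ k, pvT args k = true → c ≤ pvRa k) →
      c ≤ pvFoldR args pvRa L 6 :=
    fun c hc h => pvFoldR_lb args pvRa c L 6 hc (fun k _ ht => h k ht)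
  have ub : ∀ (x : String), pvT args x = true →
      pvFoldR args pvRa L 6 ≤ pvRa x :=
    fun x hx => pvFoldR_le_of_mem args pvRa x L 6 (hmem _ hx) hx
  split_ifs with h1 h2 h3 h4 h5 h6
  · have hu := ub _ h1; rw [pvRa_spec] at hu; simp at hu
    have hl := lb 0 (by norm_num) (fun k _ => by rw [pvRa_spec]; split_ifs <;> omega)
    omega
  · have hu := ub _ h2; rw [pvRa_spec] at hu; simp at hu
    have hl := lb 1 (by norm_num) (fun k ht => by
      rw [pvRa_spec]; split_ifs with e1 <;> try omega
      exact absurd (e1 ▸ ht) (by simpa using h1))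
    omega
  · have hu := ub _ h3; rw [pvRa_spec] at hu; simp at hu
    have hl := lb 2 (by norm_num) (fun k ht => by
      rw [pvRa_spec]; split_ifs with e1 e2 <;> try omega
      · exact absurd (e1 ▸ ht) (by simpa using h1)
      · exact absurd (e2 ▸ ht) (by simpa using h2))
    omega
  · have hu := ub _ h4; rw [pvRa_spec] at hu; simp at hu
    have hl := lb 3 (by norm_num) (fun k ht => by
      rw [pvRa_spec]; split_ifs with e1 e2 e3 <;> try omega
      · exact absurd (e1 ▸ ht) (by simpa using h1)
      · exact absurd (e2 ▸ ht) (by simpa using h2)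
      · exact absurd (e3 ▸ ht) (by simpa using h3))
    omega
  · have hu := ub _ h5; rw [pvRa_spec] at hu; simp at hu
    have hl := lb 4 (by norm_num) (fun k ht => by
      rw [pvRa_spec]; split_ifs with e1 e2 e3 e4 <;> try omega
      · exact absurd (e1 ▸ ht) (by simpa using h1)
      · exact absurd (e2 ▸ ht) (by simpa using h2)
      · exact absurd (e3 ▸ ht) (by simpa using h3)
      · exact absurd (e4 ▸ ht) (by simpa using h4))
    omega
  · have hu := ub _ h6; rw [pvRa_spec] at hu; simp at hu
    have hl := lb 5 (by norm_num) (fun k ht => by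
      rw [pvRa_spec]; split_ifs with e1 e2 e3 e4 e5 <;> try omega
      · exact absurd (e1 ▸ ht) (by simpa using h1)
      · exact absurd (e2 ▸ ht) (by simpa using h2)
      · exact absurd (e3 ▸ ht) (by simpa using h3)
      · exact absurd (e4 ▸ ht) (by simpa using h4)
      · exact absurd (e5 ▸ ht) (by simpa using h5))
    omega
  · have hu := pvFoldR_le_init args pvRa L 6
    have hl := lb 6 (by norm_num) (fun k ht => by
      rw [pvRa_spec]; split_ifs with e1 e2 e3 e4 e5 e6 <;> try omega
      · exact absurd (e1 ▸ ht) (by simpa using h1)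
      · exact absurd (e2 ▸ ht) (by simpa using h2)
      · exact absurd (e3 ▸ ht) (by simpa using h3)
      · exact absurd (e4 ▸ ht) (by simpa using h4)
      · exact absurd (e5 ▸ ht) (by simpa using h5)
      · exact absurd (e6 ▸ ht) (by simpa using h6))
    omega

-- A's inner scan, written as an if-chain over the six action flags
theorem pvInnerA_acts (args : List (String × Bool)) :
    pvInnerA args ["list", "update", "capture", "show", "setup", "cleanup"] =
      (if pvT args "list" then some "list" else if pvT args "update" then some "update"
        else if pvT args "capture" then some "capture" else if pvT args "show" then some "show"
        else if pvT args "setup" then some "setup" else if pvT args "cleanup" then some "cleanup"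
        else none) := rfl

theorem pvInnerA_cmds (args : List (String × Bool)) :
    pvInnerA args ["feed", "config", "show"] =
      (if pvT args "feed" then some "feed" else if pvT args "config" then some "config"
        else if pvT args "show" then some "show" else none) := rfl

-- if the action scan finds nothing, A's outer loop always ends in "help"
theorem pvOuterA_none (args : List (String × Bool))
    (h : pvInnerA args ["list", "update", "capture", "show", "setup", "cleanup"] = none) :
    ∀ cs, pvOuterA args cs = "help" := by
  intro cs
  induction cs with
  | nil => rfl
  | cons c rest ih =>
    simp only [pvOuterA, h]
    by_cases hc : PySem.Dict.getD (pvDict args) c false = true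
    · rw [if_pos hc]; exact ih
    · rw [if_neg hc]; exact ih

-- if the action scan finds a, A's outer loop returns the first truthy command joined with a
theorem pvOuterA_some (args : List (String × Bool)) (a : String)
    (h : pvInnerA args ["list", "update", "capture", "show", "setup", "cleanup"] = some a) :
    ∀ cs, pvOuterA args cs =
      match pvInnerA args cs with
      | none => "help"
      | some c => c ++ "_" ++ a := by
  intro cs
  induction cs with
  | nil => rfl
  | cons c rest ih =>
    simp only [pvOuterA, h]
    rw [show pvInnerA args (c :: rest) =
        if PySem.Dict.getD (pvDict args) c false = true then some c
        else pvInnerA args rest from rfl]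
    by_cases hc : PySem.Dict.getD (pvDict args) c false = true
    · rw [if_pos hc, if_pos hc]
    · rw [if_neg hc, if_neg hc]; exact ih

-- finite bridge: A's first-match shape equals B's rank-minimum shape, over all flag values
theorem pvBridge : ∀ (bf bc bs b1 b2 b3 b4 b5 b6 : Bool),
    (match (if b1 then some "list" else if b2 then some "update" else if b3 then some "capture"
            else if b4 then some "show" else if b5 then some "setup"
            else if b6 then some "cleanup" else none) with
     | none => "help"
     | some a =>
       match (if bf then some "feed" else if bc then some "config"
              else if bs then some "show" else none) with
       | none => "help"
       | some c => c ++ "_" ++ a) =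
    (if (if bf then (0:Int) else if bc then 1 else if bs then 2 else 3) < 3 ∧
        (if b1 then (0:Int) else if b2 then 1 else if b3 then 2 else if b4 then 3
          else if b5 then 4 else if b6 then 5 else 6) < 6 then
      PySem.List.pyGetD pvCommands
        (if bf then (0:Int) else if bc then 1 else if bs then 2 else 3) "" ++ "_" ++
      PySem.List.pyGetD pvActions
        (if b1 then (0:Int) else if b2 then 1 else if b3 then 2 else if b4 then 3
          else if b5 then 4 else if b6 then 5 else 6) ""
    else "help") := by
  decide

-- the two ports agree on every input
theorem pv_main (args : List (String × Bool)) : find_command args = find_command_alt args := by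
  unfold find_command find_command_alt
  by_cases h : PySem.Dict.getD (pvDict args) "help" false = true
  · rw [h]; rfl
  · have hb : PySem.Dict.getD (pvDict args) "help" false = false := by
      cases hx : PySem.Dict.getD (pvDict args) "help" false
      · rfl
      · exact absurd hx h
    rw [hb]
    show pvOuterA args ["feed", "config", "show"] = _
    rw [pvFoldB_split args _ 3 6]
    have hA : pvOuterA args ["feed", "config", "show"] =
        match pvInnerA args ["list", "update", "capture", "show", "setup", "cleanup"] with
        | none => "help"
        | some a =>
          match pvInnerA args ["feed", "config", "show"] with
          | none => "help"
          | some c => c ++ "_" ++ a := by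
      cases hI : pvInnerA args ["list", "update", "capture", "show", "setup", "cleanup"] with
      | none => rw [pvOuterA_none args hI]
      | some a => rw [pvOuterA_some args a hI]
    rw [hA, pvInnerA_acts, pvInnerA_cmds,
      pvBestC_closed args _ (fun k hk => pvMem_of_T args k hk),
      pvBestA_closed args _ (fun k hk => pvMem_of_T args k hk)]
    exact pvBridge (pvT args "feed") (pvT args "config") (pvT args "show")
      (pvT args "list") (pvT args "update") (pvT args "capture") (pvT args "show")
      (pvT args "setup") (pvT args "cleanup")

-- ===== VERDICT (by name: the statement is the Claim_ definition above) =====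
theorem find_command_spec : Claim_equal_find_command := by
  intro args _ _
  unfold Spec_find_command
  exact pv_main args
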